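-- pv_equiv track=rewrite | github.com/sbegin0/SlackFormat | slackformat/md_parser.py | _find_next_special_char
-- ===== SOURCE A (Python) =====
-- def _find_next_special_char(text: str, start: int) -> int:
--     """Find the next special markdown character."""
--     special_chars = ['*', '_', '~', '`', '<']
--     positions = []
--     for char in special_chars:
--         pos = text.find(char, start)
--         if pos != -1:
--             positions.append(pos)
--     return min(positions) if positions else -1
-- ===== SOURCE B (Python) =====
-- def _find_next_special_char(text: str, start: int) -> int:
--     """Find the next special markdown character."""
--     n = len(text)
--     i = start if start >= 0 else max(n + start, 0)
--     while i < n: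
--         if text[i] in '*_~`<':
--             return i
--         i += 1
--     return -1
-- ===== Notes on version B (the rewrite author's own statement) =====
-- stated objective: alternative
-- what changed: Replaces five whole-string find scans plus a min over collected positions by a single left-to-right scan from the (normalized) start index that stops at the first special character.
import Mathlib
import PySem

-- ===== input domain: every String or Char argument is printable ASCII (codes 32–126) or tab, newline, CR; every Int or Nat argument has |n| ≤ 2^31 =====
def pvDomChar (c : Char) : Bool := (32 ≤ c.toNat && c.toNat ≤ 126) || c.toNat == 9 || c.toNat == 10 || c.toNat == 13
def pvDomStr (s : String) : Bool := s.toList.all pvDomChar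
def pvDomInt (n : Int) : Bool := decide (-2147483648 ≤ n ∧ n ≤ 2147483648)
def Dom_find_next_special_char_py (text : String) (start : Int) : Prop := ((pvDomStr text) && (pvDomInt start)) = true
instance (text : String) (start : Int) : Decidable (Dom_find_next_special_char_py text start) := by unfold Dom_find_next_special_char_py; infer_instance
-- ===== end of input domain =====

-- B replaces A's five whole-string `str.find` scans + min over the collected positions
-- by one left-to-right scan from the normalized start index (alternative decomposition).

-- ===== PORT A =====
def find_next_special_char_py (text : String) (start : Int) : Int :=
  let special_chars : List Char := ['*', '_', '~', '`', '<']
  let positions : List Int := special_chars.foldl (fun acc char =>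
    let pos := PySem.Str.findFrom text (String.ofList [char]) start
    if pos ≠ -1 then acc ++ [pos] else acc) []
  match PySem.List.min? positions (fun x => x) with
  | some m => m
  | none => -1

-- ===== PORT B =====
-- the `while i < n` loop of Source B, as structural recursion over the remaining suffix
def pvScan : List Char → Nat → Int
  | [], _ => -1
  | c :: rest, i => if ("*_~`<".toList).contains c then (i : Int) else pvScan rest (i + 1)

def find_next_special_char_py_alt (text : String) (start : Int) : Int :=
  let n : Nat := text.toList.length
  let i : Nat := if 0 ≤ start then start.toNat else ((n : Int) + start).toNat
  pvScan (text.toList.drop i) i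

-- ===== PRECONDITION & SPEC =====
def Spec_find_next_special_char_py (text : String) (start : Int) (out : Int) : Prop := out = find_next_special_char_py_alt text start
instance (text : String) (start : Int) (out : Int) : Decidable (Spec_find_next_special_char_py text start out) := by unfold Spec_find_next_special_char_py; infer_instance

-- ===== CLAIM (what is proved, stated in full; the proofs are below) =====
def Claim_equal_find_next_special_char_py : Prop := ∀ (text : String) (start : Int), Dom_find_next_special_char_py text start → Spec_find_next_special_char_py text start (find_next_special_char_py text start)

-- ===== LEMMAS AND PROOFS =====

-- findFrom with an arbitrary Int start, evaluated through the normalized Nat start k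
theorem pv_findFrom_eval (s sub : List Char) (start : Int) (k : Nat)
    (hk : (k : Int) = if start < 0 then (if start + s.length < 0 then 0 else start + s.length) else start) :
    PySem.Chars.findFrom s sub start none =
      if s.length < k then -1
      else if PySem.Chars.find (s.drop k) sub = -1 then -1
      else (k : Int) + PySem.Chars.find (s.drop k) sub := by
  simp only [PySem.Chars.findFrom, Int.toNat_natCast, List.take_length]
  rw [← hk]
  simp only [Int.toNat_natCast, List.take_length, Nat.cast_lt]

-- [c] is a prefix of u iff u starts with c
theorem pv_singleton_prefix (c : Char) (u : List Char) : [c] <+: u ↔ u.head? = some c := by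
  cases u with
  | nil => simp
  | cons a v => simp [List.cons_prefix_cons]; tauto

-- first occurrence characterisation of find t [c]
theorem pv_find_singleton_mem (c : Char) (t : List Char) (h : c ∈ t) :
    0 ≤ PySem.Chars.find t [c] ∧ t[(PySem.Chars.find t [c]).toNat]? = some c ∧
      ∀ i < (PySem.Chars.find t [c]).toNat, t[i]? ≠ some c := by
  have hnn : 0 ≤ PySem.Chars.find t [c] :=
    (PySem.Chars.find_nonneg_iff t [c]).mpr ((List.singleton_infix_iff c t).mpr h)
  obtain ⟨hat, hmin⟩ := PySem.Chars.find_spec hnn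
  refine ⟨hnn, ?_, ?_⟩
  · rw [← List.head?_drop]; exact (pv_singleton_prefix c _).mp hat
  · intro i hi hcon
    exact hmin i hi ((pv_singleton_prefix c _).mpr (by rw [List.head?_drop]; exact hcon))

theorem pv_scan_eq (t : List Char) (k : Nat) :
    pvScan t k = match t.findIdx? (fun c => ("*_~`<".toList).contains c) with
      | some j => ((k + j : Nat) : Int)
      | none => -1 := by
  induction t generalizing k with
  | nil => simp [pvScan]
  | cons c rest ih =>
    rw [List.findIdx?_cons]
    by_cases hc : ("*_~`<".toList).contains c = true
    · rw [if_pos hc]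
      simp only [pvScan]
      rw [if_pos hc]
      norm_num
    · rw [if_neg hc]
      simp only [pvScan]
      rw [if_neg hc, ih]
      cases h : rest.findIdx? (fun c => ("*_~`<".toList).contains c) with
      | none => simp
      | some j => simp; push_cast; ring

-- the A-side fold turns into filter + map
theorem pv_fold_eq (cs t : List Char) (k : Nat) :
    cs.foldl (fun acc c =>
        if (if PySem.Chars.find t [c] = -1 then (-1 : Int) else (k : Int) + PySem.Chars.find t [c]) ≠ -1
        then acc ++ [if PySem.Chars.find t [c] = -1 then (-1 : Int) else (k : Int) + PySem.Chars.find t [c]]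
        else acc) []
      = (cs.filter (fun c => t.contains c)).map (fun c => (k : Int) + PySem.Chars.find t [c]) := by
  have hstep : (fun (acc : List Int) (c : Char) =>
        if (if PySem.Chars.find t [c] = -1 then (-1 : Int) else (k : Int) + PySem.Chars.find t [c]) ≠ -1
        then acc ++ [if PySem.Chars.find t [c] = -1 then (-1 : Int) else (k : Int) + PySem.Chars.find t [c]]
        else acc)
      = (fun acc c =>
        if (fun c => decide ((if PySem.Chars.find t [c] = -1 then (-1 : Int) else (k : Int) + PySem.Chars.find t [c]) ≠ -1)) c = true
        then acc ++ [(fun c => if PySem.Chars.find t [c] = -1 then (-1 : Int) else (k : Int) + PySem.Chars.find t [c]) c]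
        else acc) := by
    funext acc c
    by_cases hne : (if PySem.Chars.find t [c] = -1 then (-1 : Int) else (k : Int) + PySem.Chars.find t [c]) ≠ -1
    · rw [if_pos hne, if_pos (decide_eq_true hne)]
    · rw [if_neg hne, if_neg (by simp only [decide_eq_true_iff]; exact hne)]
  rw [hstep, PySem.List.foldl_append_if, List.nil_append]
  have hpred : ∀ c ∈ cs,
      (decide ((if PySem.Chars.find t [c] = -1 then (-1 : Int) else (k : Int) + PySem.Chars.find t [c]) ≠ -1))
        = t.contains c := by
    intro c _
    by_cases hmem : c ∈ t
    · have hnn : 0 ≤ PySem.Chars.find t [c] :=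
        (PySem.Chars.find_nonneg_iff t [c]).mpr ((List.singleton_infix_iff c t).mpr hmem)
      have hne : PySem.Chars.find t [c] ≠ -1 := by omega
      rw [if_neg hne]
      have : ((k : Int) + PySem.Chars.find t [c]) ≠ -1 := by omega
      simp [this, hmem]
    · have heq : PySem.Chars.find t [c] = -1 :=
        (PySem.Chars.find_eq_neg_one_iff t [c]).mpr (by
          rw [List.singleton_infix_iff]; exact hmem)
      rw [if_pos heq]
      simp [hmem]
  rw [List.filter_congr hpred]
  apply List.map_congr_left
  intro c hcf
  have hct : c ∈ t := by
    have h8 := (List.mem_filter.mp hcf).2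
    rw [List.contains_eq_mem, decide_eq_true_eq] at h8
    exact h8
  have hnn : 0 ≤ PySem.Chars.find t [c] :=
    (PySem.Chars.find_nonneg_iff t [c]).mpr ((List.singleton_infix_iff c t).mpr hct)
  rw [if_neg (by omega)]

theorem pv_main (t : List Char) (k : Nat) :
    (match PySem.List.min? ((("*_~`<".toList).filter (fun c => t.contains c)).map
        (fun c => (k : Int) + PySem.Chars.find t [c])) (fun x => x) with
      | some m => m
      | none => -1) = pvScan t k := by
  rw [pv_scan_eq]
  cases h : t.findIdx? (fun c => ("*_~`<".toList).contains c) with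
  | none =>
    have hall := List.findIdx?_eq_none_iff.mp h
    have hfil : ("*_~`<".toList).filter (fun c => t.contains c) = [] := by
      rw [List.filter_eq_nil_iff]
      intro c hc
      rw [List.contains_eq_mem, decide_eq_true_eq]
      intro hct
      have h2 := hall c hct
      rw [List.contains_eq_mem, decide_eq_false_iff_not] at h2
      exact h2 hc
    rw [hfil, List.map_nil,
      (PySem.List.min?_eq_none_iff ([] : List Int) (fun x => x)).mpr rfl]
  | some j =>
    obtain ⟨hjlen, hjidx⟩ := List.findIdx?_eq_some_iff_findIdx_eq.mp h
    have hc0sp : ("*_~`<".toList).contains t[j] = true := by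
      have hw : List.findIdx (fun c => ("*_~`<".toList).contains c) t < t.length := by
        rw [hjidx]; exact hjlen
      have h0 := List.findIdx_getElem (w := hw)
      simpa only [hjidx] using h0
    have hmin : ∀ i, i < j → ∀ (hil : i < t.length), ("*_~`<".toList).contains (t[i]'hil) = false := by
      intro i hi hil
      have h0 := @List.not_of_lt_findIdx _ (fun c => ("*_~`<".toList).contains c) t i (by rw [hjidx]; exact hi)
      exact h0
    have hc0t : t[j] ∈ t := List.getElem_mem hjlen
    obtain ⟨hnn, hat, hbefore⟩ := pv_find_singleton_mem t[j] t hc0t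
    have hrj : (PySem.Chars.find t [t[j]]).toNat = j := by
      rcases Nat.lt_trichotomy (PySem.Chars.find t [t[j]]).toNat j with hlt | heq | hgt
      · exfalso
        have hlen : (PySem.Chars.find t [t[j]]).toNat < t.length := by omega
        have heqc : t[(PySem.Chars.find t [t[j]]).toNat] = t[j] := by
          have := hat; rwa [List.getElem?_eq_getElem hlen, Option.some_inj] at this
        have h5 := hmin _ hlt hlen
        rw [heqc, hc0sp] at h5
        exact Bool.noConfusion h5
      · exact heq
      · exact absurd (List.getElem?_eq_getElem hjlen) (hbefore j hgt)
    have hfind : PySem.Chars.find t [t[j]] = (j : Int) := by omega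
    set M := (("*_~`<".toList).filter (fun c => t.contains c)).map
        (fun c => (k : Int) + PySem.Chars.find t [c]) with hM
    have hwit : ((k : Int) + j) ∈ M := by
      rw [hM]
      refine List.mem_map.mpr ⟨t[j], List.mem_filter.mpr ⟨?_, ?_⟩, by rw [hfind]⟩
      · rw [List.contains_eq_mem, decide_eq_true_eq] at hc0sp; exact hc0sp
      · rw [List.contains_eq_mem, decide_eq_true_eq]; exact hc0t
    have hlb : ∀ m ∈ M, ((k : Int) + j) ≤ m := by
      intro m hm
      rw [hM] at hm
      obtain ⟨c, hcf, rfl⟩ := List.mem_map.mp hm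
      obtain ⟨hcs, hct⟩ := List.mem_filter.mp hcf
      have hctm : c ∈ t := by
        rw [List.contains_eq_mem, decide_eq_true_eq] at hct; exact hct
      obtain ⟨hnn2, hat2, _⟩ := pv_find_singleton_mem c t hctm
      have hlen2 : (PySem.Chars.find t [c]).toNat < t.length := by
        by_contra hge
        rw [List.getElem?_eq_none (by omega)] at hat2
        exact Option.some_ne_none c hat2.symm
      have hc2 : t[(PySem.Chars.find t [c]).toNat] = c := by
        have := hat2; rwa [List.getElem?_eq_getElem hlen2, Option.some_inj] at this
      have hge : j ≤ (PySem.Chars.find t [c]).toNat := by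
        by_contra hlt
        push_neg at hlt
        have h6 := hmin _ hlt hlen2
        rw [hc2] at h6
        have h7 : ("*_~`<".toList).contains c = true := by
          rw [List.contains_eq_mem, decide_eq_true_eq]; exact hcs
        rw [h7] at h6
        exact Bool.noConfusion h6
      omega
    cases hm : PySem.List.min? M (fun x => x) with
    | none =>
      exfalso
      rw [PySem.List.min?_eq_none_iff] at hm
      rw [hm] at hwit
      exact List.not_mem_nil hwit
    | some m =>
      have h1 := PySem.List.min?_mem hm
      have h2 := PySem.List.min?_isMin hm _ hwit
      have h3 := hlb m h1
      have : m = (k : Int) + j := le_antisymm (by exact h2) h3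
      rw [this]
      push_cast
      ring

-- ===== VERDICT (by name: the statement is the Claim_ definition above) =====
theorem find_next_special_char_py_spec : Claim_equal_find_next_special_char_py := by
  intro text start _
  unfold Spec_find_next_special_char_py find_next_special_char_py find_next_special_char_py_alt
  simp only [PySem.Str.findFrom_eq, String.toList_ofList]
  set s := text.toList with hs
  set k : Nat := if 0 ≤ start then start.toNat else ((s.length : Int) + start).toNat with hkdef
  have hk : (k : Int) = if start < 0 then (if start + s.length < 0 then 0 else start + s.length) else start := by
    rw [hkdef]; split_ifs <;> omega
  simp only [pv_findFrom_eval s _ start k hk]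
  by_cases hbig : s.length < k
  · have hdrop : s.drop k = [] := List.drop_eq_nil_of_le (by omega)
    simp [hbig, hdrop, pvScan]
    rw [(PySem.List.min?_eq_none_iff ([] : List Int) (fun x => x)).mpr rfl]
  · simp only [if_neg hbig]
    rw [pv_fold_eq ['*', '_', '~', '`', '<'] (s.drop k) k]
    have : (['*', '_', '~', '`', '<'] : List Char) = "*_~`<".toList := by decide
    rw [this]
    exact pv_main (s.drop k) k
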